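-- pv_equiv track=rewrite | github.com/bennyistanto/to-rdls | src/integrate.py | determine_filename_prefix
-- ===== SOURCE A (Python) =====
-- from typing import Any, Dict, List, Optional, Set, Tuple
--
-- def determine_filename_prefix(
--     components: List[str],
--     prefix_map: Optional[Dict[str, str]] = None,
--     prefix_priority: Optional[List[str]] = None,
-- ) -> str:
--     """Select filename prefix by highest-priority component present.
--
--     DEPRECATED: Use naming.encode_component_types() or naming.build_rdls_id()
--     instead. This function is retained only for backward compatibility with
--     code that hasn't been updated yet.
--
--     Priority order (default): loss > vulnerability > exposure > hazard.
--     """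
--     if prefix_map is None:
--         prefix_map = {
--             "hazard": "rdls_hzd",
--             "exposure": "rdls_exp",
--             "vulnerability": "rdls_vln",
--             "loss": "rdls_lss",
--         }
--     if prefix_priority is None:
--         prefix_priority = ["loss", "vulnerability", "exposure", "hazard"]
--
--     comp_set = set(components)
--     for comp in prefix_priority:
--         if comp in comp_set and comp in prefix_map:
--             return prefix_map[comp]
--
--     return "rdls_hzd"  # fallback
-- ===== SOURCE B (Python) =====
-- from typing import Dict, List, Optional
--
--
-- def determine_filename_prefix(
--     components: List[str],
--     prefix_map: Optional[Dict[str, str]] = None,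
--     prefix_priority: Optional[List[str]] = None,
-- ) -> str:
--     if prefix_map is None:
--         prefix_map = {
--             "hazard": "rdls_hzd",
--             "exposure": "rdls_exp",
--             "vulnerability": "rdls_vln",
--             "loss": "rdls_lss",
--         }
--     if prefix_priority is None:
--         prefix_priority = ["loss", "vulnerability", "exposure", "hazard"]
--
--     rank = {}
--     for i, c in enumerate(prefix_priority):
--         rank.setdefault(c, i)
--
--     best_rank = len(prefix_priority)
--     result = "rdls_hzd"
--     for comp in components:
--         r = rank.get(comp)
--         v = prefix_map.get(comp)
--         if r is not None and v is not None and r < best_rank: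
--             best_rank = r
--             result = v
--     return result
-- ===== Notes on version B (the rewrite author's own statement) =====
-- stated objective: alternative
-- what changed: A scans the priority list and probes a set of the components; B inverts the traversal: it builds a first-occurrence rank dict from the priority list once, then makes a single min-tracking pass over the components, returning the mapped value of the lowest-ranked component present.
import Mathlib
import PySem

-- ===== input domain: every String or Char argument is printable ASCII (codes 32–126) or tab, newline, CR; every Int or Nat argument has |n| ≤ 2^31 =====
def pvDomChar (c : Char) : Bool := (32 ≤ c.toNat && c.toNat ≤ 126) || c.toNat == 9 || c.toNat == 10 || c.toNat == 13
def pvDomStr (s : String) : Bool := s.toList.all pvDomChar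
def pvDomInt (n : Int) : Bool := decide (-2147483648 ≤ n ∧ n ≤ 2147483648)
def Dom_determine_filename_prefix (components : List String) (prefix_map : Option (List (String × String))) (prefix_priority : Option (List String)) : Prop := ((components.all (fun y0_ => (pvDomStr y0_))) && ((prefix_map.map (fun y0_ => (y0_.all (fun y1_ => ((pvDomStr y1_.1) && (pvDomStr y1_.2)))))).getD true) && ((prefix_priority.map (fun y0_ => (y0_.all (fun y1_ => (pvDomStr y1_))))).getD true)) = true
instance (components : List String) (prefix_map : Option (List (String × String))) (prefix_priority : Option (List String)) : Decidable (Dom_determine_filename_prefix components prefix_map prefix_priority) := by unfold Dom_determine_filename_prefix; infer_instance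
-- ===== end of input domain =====

-- B replaces A's scan over the priority list (with a membership set of the components)
-- by a first-occurrence rank dict over the priority list plus a single min-tracking pass
-- over the components; objective: alternative decomposition, same return value everywhere.

-- ===== PORT A =====
-- A's loop: for comp in prefix_priority: if comp in comp_set and comp in prefix_map: return prefix_map[comp]
def pvAloop (cs : PySem.Set String) (pm : PySem.Dict String String) : List String → String
  | [] => "rdls_hzd"
  | c :: rest =>
    if PySem.Set.contains cs c then
      match PySem.Dict.get? pm c with
      | some v => v
      | none => pvAloop cs pm rest
    else pvAloop cs pm rest

def determine_filename_prefix (components : List String) (prefix_map : Option (List (String × String))) (prefix_priority : Option (List String)) : String :=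
  let pm : PySem.Dict String String := PySem.Dict.mk (prefix_map.getD
    [("hazard", "rdls_hzd"), ("exposure", "rdls_exp"), ("vulnerability", "rdls_vln"), ("loss", "rdls_lss")])
  let pp := prefix_priority.getD ["loss", "vulnerability", "exposure", "hazard"]
  let compSet := PySem.Set.ofList components
  pvAloop compSet pm pp

-- ===== PORT B =====
-- rank = {}; for i, c in enumerate(prefix_priority): rank.setdefault(c, i)
def pvRank (pp : List String) : PySem.Dict String Int :=
  (PySem.List.enumerate pp 0).foldl (fun d p => PySem.Dict.setdefault d p.2 p.1) PySem.Dict.empty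

-- one pass over components keeping (best_rank, result)
def pvBstep (rank : PySem.Dict String Int) (pm : PySem.Dict String String)
    (st : Int × String) (comp : String) : Int × String :=
  let r := PySem.Dict.get? rank comp
  let v := PySem.Dict.get? pm comp
  match r, v with
  | some r0, some v0 => if r0 < st.1 then (r0, v0) else st
  | _, _ => st

def determine_filename_prefix_alt (components : List String) (prefix_map : Option (List (String × String))) (prefix_priority : Option (List String)) : String :=
  let pm : PySem.Dict String String := PySem.Dict.mk (prefix_map.getD
    [("hazard", "rdls_hzd"), ("exposure", "rdls_exp"), ("vulnerability", "rdls_vln"), ("loss", "rdls_lss")])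
  let pp := prefix_priority.getD ["loss", "vulnerability", "exposure", "hazard"]
  let rank := pvRank pp
  (components.foldl (pvBstep rank pm) ((pp.length : Int), "rdls_hzd")).2

-- ===== PRECONDITION & SPEC =====
def Spec_determine_filename_prefix (components : List String) (prefix_map : Option (List (String × String))) (prefix_priority : Option (List String)) (out : String) : Prop := out = determine_filename_prefix_alt components prefix_map prefix_priority
instance (components : List String) (prefix_map : Option (List (String × String))) (prefix_priority : Option (List String)) (out : String) : Decidable (Spec_determine_filename_prefix components prefix_map prefix_priority out) := by unfold Spec_determine_filename_prefix; infer_instance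

-- ===== CLAIM (what is proved, stated in full; the proofs are below) =====
def Claim_equal_determine_filename_prefix : Prop := ∀ (components : List String) (prefix_map : Option (List (String × String))) (prefix_priority : Option (List String)), Dom_determine_filename_prefix components prefix_map prefix_priority → Spec_determine_filename_prefix components prefix_map prefix_priority (determine_filename_prefix components prefix_map prefix_priority)

-- ===== LEMMAS AND PROOFS =====

-- first-occurrence index of c in a list
def pvFIdx (c : String) : List String → Option Nat
  | [] => none
  | x :: xs => if x = c then some 0 else (pvFIdx c xs).map Nat.succ

-- A's scan expressed over the plain component list L
def pvScan (L : List String) (pm : PySem.Dict String String) : List String → String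
  | [] => "rdls_hzd"
  | c :: rest =>
    if L.contains c && (PySem.Dict.get? pm c).isSome then
      (PySem.Dict.get? pm c).getD "rdls_hzd"
    else pvScan L pm rest

-- position of the first qualifying priority entry (length of the priority list if none)
def pvMin (L : List String) (pm : PySem.Dict String String) : List String → Nat
  | [] => 0
  | c :: rest =>
    if L.contains c && (PySem.Dict.get? pm c).isSome then 0 else pvMin L pm rest + 1

theorem pvSetdefault_eq (d : PySem.Dict String Int) (k : String) (v : Int) :
    PySem.Dict.setdefault d k v = if d.contains k then d else d.insert k v := by
  simp only [PySem.Dict.setdefault]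
  split_ifs with h
  · rfl
  · apply PySem.Dict.ext
    rw [PySem.Dict.items_insert_of_not_contains d v (by simpa using h)]

theorem pvRank_aux (c : String) : ∀ (pp : List String) (s : Int) (d : PySem.Dict String Int),
    PySem.Dict.get? ((PySem.List.enumerate pp s).foldl (fun d p => PySem.Dict.setdefault d p.2 p.1) d) c
    = match PySem.Dict.get? d c with
      | some w => some w
      | none => (pvFIdx c pp).map (fun n => s + n) := by
  intro pp
  induction pp with
  | nil => intro s d; simp [PySem.List.enumerate, pvFIdx]; cases PySem.Dict.get? d c <;> simp
  | cons x xs ih =>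
    intro s d
    rw [PySem.List.enumerate_cons, List.foldl_cons, ih, pvSetdefault_eq]
    dsimp only
    by_cases hc : d.contains x = true
    · rw [if_pos hc]
      cases hdc : PySem.Dict.get? d c with
      | some w => simp
      | none =>
        have hxc : x ≠ c := by
          intro he; subst he
          rw [PySem.Dict.contains_eq_isSome_get?, hdc] at hc; simp at hc
        simp only [pvFIdx, hxc, if_false]
        cases pvFIdx c xs <;> simp
        · omega
    · rw [if_neg hc, PySem.Dict.get?_insert]
      by_cases hxc : c = x
      · subst hxc
        rw [if_pos rfl]
        have hdc : PySem.Dict.get? d c = none := by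
          rw [PySem.Dict.contains_eq_isSome_get?] at hc
          cases h : PySem.Dict.get? d c <;> simp [h] at hc ⊢
        simp [hdc, pvFIdx]
      · rw [if_neg hxc]
        cases hdc : PySem.Dict.get? d c with
        | some w => simp
        | none =>
          have hxc' : x ≠ c := Ne.symm hxc
          simp only [pvFIdx, hxc', if_false]
          cases pvFIdx c xs <;> simp
          · omega


theorem pvContains_append_ne (L : List String) {x c : String} (h : x ≠ c) :
    (L ++ [c]).contains x = L.contains x := by
  simp [List.contains_eq_mem, h]

theorem pvStep_none (L : List String) (c : String) (pm : PySem.Dict String String)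
    (pp : List String) (h : PySem.Dict.get? pm c = none) :
    pvMin (L ++ [c]) pm pp = pvMin L pm pp ∧ pvScan (L ++ [c]) pm pp = pvScan L pm pp := by
  induction pp with
  | nil => exact ⟨rfl, rfl⟩
  | cons x rest ih =>
    have htest : ((L ++ [c]).contains x && (PySem.Dict.get? pm x).isSome)
        = ((L.contains x && (PySem.Dict.get? pm x).isSome)) := by
      by_cases hxc : x = c
      · subst hxc; simp [h]
      · rw [pvContains_append_ne L hxc]
    exact ⟨by simp only [pvMin, htest, ih.1], by simp only [pvScan, htest, ih.2]⟩

theorem pvStep_notin (L : List String) (c : String) (pm : PySem.Dict String String)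
    (pp : List String) (h : pvFIdx c pp = none) :
    pvMin (L ++ [c]) pm pp = pvMin L pm pp ∧ pvScan (L ++ [c]) pm pp = pvScan L pm pp := by
  induction pp with
  | nil => exact ⟨rfl, rfl⟩
  | cons x rest ih =>
    have hxc : x ≠ c := by
      intro he; simp [pvFIdx, he] at h
    have hrest : pvFIdx c rest = none := by
      simp [pvFIdx, hxc] at h; exact h
    have htest : ((L ++ [c]).contains x && (PySem.Dict.get? pm x).isSome)
        = ((L.contains x && (PySem.Dict.get? pm x).isSome)) := by
      rw [pvContains_append_ne L hxc]
    exact ⟨by simp only [pvMin, htest, (ih hrest).1],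
           by simp only [pvScan, htest, (ih hrest).2]⟩

theorem pvStep_some (L : List String) (c : String) (pm : PySem.Dict String String)
    (v0 : String) (hv : PySem.Dict.get? pm c = some v0) :
    ∀ (pp : List String) (r0 : Nat), pvFIdx c pp = some r0 →
    (r0 < pvMin L pm pp → pvMin (L ++ [c]) pm pp = r0 ∧ pvScan (L ++ [c]) pm pp = v0)
    ∧ (¬ r0 < pvMin L pm pp →
        pvMin (L ++ [c]) pm pp = pvMin L pm pp ∧ pvScan (L ++ [c]) pm pp = pvScan L pm pp) := by
  intro pp
  induction pp with
  | nil => intro r0 h; simp [pvFIdx] at h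
  | cons x rest ih =>
    intro r0 h
    by_cases hxc : x = c
    · subst hxc
      simp [pvFIdx] at h
      subst h
      have hctrue : ((L ++ [x]).contains x && (PySem.Dict.get? pm x).isSome) = true := by
        simp [List.contains_eq_mem, hv]
      constructor
      · intro hlt
        refine ⟨by simp [pvMin, hv, List.contains_eq_mem], ?_⟩
        simp [pvScan, hv, List.contains_eq_mem]
      · intro hge
        have h0 : pvMin L pm (x :: rest) = 0 := by omega
        have hcL : (L.contains x && (PySem.Dict.get? pm x).isSome) = true := by
          by_contra hn
          have : pvMin L pm (x :: rest) = pvMin L pm rest + 1 := by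
            simp only [pvMin]; rw [if_neg (by simpa using hn)]
          omega
        have hmem : x ∈ L := by simp [hv, List.contains_eq_mem] at hcL; exact hcL
        refine ⟨?_, ?_⟩
        · simp [pvMin, hv, List.contains_eq_mem, hmem]
        · simp [pvScan, hv, List.contains_eq_mem, hmem]
    · simp only [pvFIdx, if_neg hxc] at h
      cases hr : pvFIdx c rest with
      | none => rw [hr] at h; simp at h
      | some r1 =>
        rw [hr] at h; simp at h
        have htest : ((L ++ [c]).contains x && (PySem.Dict.get? pm x).isSome)
            = ((L.contains x && (PySem.Dict.get? pm x).isSome)) := by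
          rw [pvContains_append_ne L hxc]
        cases hcx : (L.contains x && (PySem.Dict.get? pm x).isSome) with
        | true =>
          constructor
          · intro hlt
            exfalso
            have : pvMin L pm (x :: rest) = 0 := by simp only [pvMin, hcx, if_true]
            omega
          · intro _
            have h1 : pvMin (L ++ [c]) pm (x :: rest) = 0 := by
              simp only [pvMin, htest, hcx, if_true]
            have h2 : pvMin L pm (x :: rest) = 0 := by simp only [pvMin, hcx, if_true]
            refine ⟨by rw [h1, h2], ?_⟩
            simp only [pvScan, htest, hcx, if_true]
        | false =>
          have hm : pvMin L pm (x :: rest) = pvMin L pm rest + 1 := by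
            simp only [pvMin, hcx, Bool.false_eq_true, if_false]
          constructor
          · intro hlt
            have hlt' : r1 < pvMin L pm rest := by omega
            have := ((ih r1 hr).1 hlt')
            refine ⟨?_, ?_⟩
            · simp only [pvMin, htest, hcx, Bool.false_eq_true, if_false, this.1]; omega
            · simp only [pvScan, htest, hcx, Bool.false_eq_true, if_false, this.2]
          · intro hge
            have hge' : ¬ r1 < pvMin L pm rest := by omega
            have := ((ih r1 hr).2 hge')
            refine ⟨?_, ?_⟩
            · simp only [pvMin, htest, hcx, Bool.false_eq_true, if_false, this.1]
            · simp only [pvScan, htest, hcx, Bool.false_eq_true, if_false, this.2]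


theorem pvAloop_eq_scan (components : List String) (pm : PySem.Dict String String)
    (pp : List String) :
    pvAloop (PySem.Set.ofList components) pm pp = pvScan components pm pp := by
  induction pp with
  | nil => rfl
  | cons c rest ih =>
    have hset : PySem.Set.contains (PySem.Set.ofList components) c = components.contains c := by
      simp [pysem]
    simp only [pvAloop, pvScan, hset, ih]
    cases PySem.Dict.get? pm c <;> cases components.contains c <;> simp

theorem pvMin_nil (pm : PySem.Dict String String) (pp : List String) :
    pvMin [] pm pp = pp.length ∧ pvScan [] pm pp = "rdls_hzd" := by
  induction pp with
  | nil => exact ⟨rfl, rfl⟩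
  | cons c rest ih => simp [pvMin, pvScan, ih.1, ih.2]

theorem pvRank_get (pp : List String) (c : String) :
    PySem.Dict.get? (pvRank pp) c = (pvFIdx c pp).map (fun n => (n : Int)) := by
  unfold pvRank
  rw [pvRank_aux]
  simp [PySem.Dict.get?_empty]

theorem pvFold_inv (pm : PySem.Dict String String) (pp : List String) :
    ∀ (rest L : List String),
    rest.foldl (pvBstep (pvRank pp) pm) ((pvMin L pm pp : Int), pvScan L pm pp)
      = ((pvMin (L ++ rest) pm pp : Int), pvScan (L ++ rest) pm pp) := by
  intro rest
  induction rest with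
  | nil => intro L; simp
  | cons c rest' ih =>
    intro L
    rw [List.foldl_cons]
    have hstep : pvBstep (pvRank pp) pm ((pvMin L pm pp : Int), pvScan L pm pp) c
        = ((pvMin (L ++ [c]) pm pp : Int), pvScan (L ++ [c]) pm pp) := by
      unfold pvBstep
      rw [pvRank_get]
      cases hv : PySem.Dict.get? pm c with
      | none =>
        cases hf : pvFIdx c pp <;>
          simp [(pvStep_none L c pm pp hv).1, (pvStep_none L c pm pp hv).2]
      | some v0 =>
        cases hf : pvFIdx c pp with
        | none =>
          simp [(pvStep_notin L c pm pp hf).1, (pvStep_notin L c pm pp hf).2]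
        | some r0 =>
          have hs := pvStep_some L c pm v0 hv pp r0 hf
          show (if ((r0 : Nat) : Int) < (pvMin L pm pp : Int) then (((r0 : Nat) : Int), v0)
                else ((pvMin L pm pp : Int), pvScan L pm pp))
              = ((pvMin (L ++ [c]) pm pp : Int), pvScan (L ++ [c]) pm pp)
          by_cases hlt : r0 < pvMin L pm pp
          · rw [if_pos (by exact_mod_cast hlt)]
            have := hs.1 hlt
            simp [this.1, this.2]
          · rw [if_neg (by exact_mod_cast hlt)]
            have := hs.2 hlt
            simp [this.1, this.2]
    rw [hstep, ih (L ++ [c]), List.append_assoc]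
    rfl


-- ===== VERDICT (by name: the statement is the Claim_ definition above) =====
theorem determine_filename_prefix_spec : Claim_equal_determine_filename_prefix := by
  intro components prefix_map prefix_priority _
  unfold Spec_determine_filename_prefix determine_filename_prefix determine_filename_prefix_alt
  have hb := pvFold_inv (PySem.Dict.mk (prefix_map.getD
    [("hazard", "rdls_hzd"), ("exposure", "rdls_exp"), ("vulnerability", "rdls_vln"), ("loss", "rdls_lss")]))
    (prefix_priority.getD ["loss", "vulnerability", "exposure", "hazard"]) components []
  have h0 := pvMin_nil (PySem.Dict.mk (prefix_map.getD
    [("hazard", "rdls_hzd"), ("exposure", "rdls_exp"), ("vulnerability", "rdls_vln"), ("loss", "rdls_lss")]))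
    (prefix_priority.getD ["loss", "vulnerability", "exposure", "hazard"])
  simp only [h0.1, h0.2, List.nil_append] at hb
  simp only [pvAloop_eq_scan, hb]
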